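-- pv_equiv track=rewrite | github.com/aaronspringer/AdventofCode | 2023/Day6/day6.py | calculate
-- ===== SOURCE A (Python) =====
-- from math import prod
--
-- def calculate(times, distances):
--     winners = []
--
--     for i in range(len(times)):
--         time = times[i]
--         distance = distances[i]
--         validholds = 0
--
--         for holdtime in range(time):
--             speed = holdtime
--             traveltime = time - holdtime
--             totaldistance = speed * traveltime
--             if totaldistance > distance:
--                 validholds += 1
--
--         winners.append(validholds)
--
--     return winners, prod(winners)
-- ===== SOURCE B (Python) =====
-- from math import prod, isqrt
--
-- def calculate(times, distances):
--     winners = []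
--     for t, d in zip(times, distances):
--         disc = t * t - 4 * d
--         if disc <= 0:
--             winners.append(0)
--         else:
--             s = isqrt(disc - 1)
--             lo = max(0, (t - s + 1) // 2)
--             hi = min(t - 1, (t + s) // 2)
--             winners.append(max(0, hi - lo + 1))
--     return winners, prod(winners)
-- ===== Notes on version B (the rewrite author's own statement) =====
-- stated objective: faster
-- what changed: Replaces A's per-race scan over every hold time in range(time) by an O(1) closed-form count of the integers in the open winning interval, computed from the quadratic formula with math.isqrt, and pairs races with zip instead of indexing.
import Mathlib
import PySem

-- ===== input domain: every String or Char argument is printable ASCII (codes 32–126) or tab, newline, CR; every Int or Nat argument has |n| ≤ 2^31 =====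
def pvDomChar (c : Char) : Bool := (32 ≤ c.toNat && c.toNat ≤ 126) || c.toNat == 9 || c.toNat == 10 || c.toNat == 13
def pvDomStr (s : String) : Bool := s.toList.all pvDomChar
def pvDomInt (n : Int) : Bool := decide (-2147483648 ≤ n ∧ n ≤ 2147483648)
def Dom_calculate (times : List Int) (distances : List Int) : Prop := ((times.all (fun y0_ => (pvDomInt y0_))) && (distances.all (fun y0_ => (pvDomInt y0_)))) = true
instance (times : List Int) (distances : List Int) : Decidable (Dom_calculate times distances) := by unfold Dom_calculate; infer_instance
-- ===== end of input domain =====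

-- B replaces A's per-race scan over every hold time by a closed-form count of the
-- integers in the open winning interval, obtained from the quadratic formula via isqrt.

-- ===== PORT A =====
def calculate (times : List Int) (distances : List Int) : List Int × Int :=
  let winners := (PySem.List.pyRange 0 (times.length : Int) 1).foldl (fun winners i =>
    -- 'time = times[i]; distance = distances[i]' — pyGet? none = IndexError, excluded by Pre_
    match PySem.List.pyGet? times i, PySem.List.pyGet? distances i with
    | some time, some distance =>
        let validholds := (PySem.List.pyRange 0 time 1).foldl (fun validholds holdtime =>
          let speed := holdtime
          let traveltime := time - holdtime
          let totaldistance := speed * traveltime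
          if totaldistance > distance then validholds + 1 else validholds) 0
        winners ++ [validholds]
    | _, _ => winners) []
  (winners, winners.foldl (· * ·) 1)

-- ===== PORT B =====
-- one race: count of h with h*(t-h) > d and 0 ≤ h < t, by the quadratic formula (math.isqrt = Nat.sqrt)
def winCount (p : Int × Int) : Int :=
  let t := p.1
  let d := p.2
  let disc := t * t - 4 * d
  if disc ≤ 0 then 0
  else
    let s : Int := (Nat.sqrt (disc - 1).toNat : Int)
    let lo := max 0 (PySem.Int.floordiv (t - s + 1) 2)
    let hi := min (t - 1) (PySem.Int.floordiv (t + s) 2)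
    max 0 (hi - lo + 1)

def calculate_alt (times : List Int) (distances : List Int) : List Int × Int :=
  let winners := (times.zip distances).map winCount
  (winners, winners.foldl (· * ·) 1)

-- ===== PRECONDITION & SPEC =====
-- Pre_ excludes exactly the inputs where A raises IndexError: distances shorter than times.
def Pre_calculate (times : List Int) (distances : List Int) : Prop :=
  times.length ≤ distances.length
instance (times : List Int) (distances : List Int) : Decidable (Pre_calculate times distances) := by
  unfold Pre_calculate; infer_instance

def pvWitness_calculate : List Int × List Int := ([7, 30], [9, 200])

def Spec_calculate (times : List Int) (distances : List Int) (out : List Int × Int) : Prop := out = calculate_alt times distances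
instance (times : List Int) (distances : List Int) (out : List Int × Int) : Decidable (Spec_calculate times distances out) := by unfold Spec_calculate; infer_instance

-- ===== CLAIM (what is proved, stated in full; the proofs are below) =====
def Claim_equal_calculate : Prop := ∀ (times : List Int) (distances : List Int), Dom_calculate times distances → Pre_calculate times distances → Spec_calculate times distances (calculate times distances)

-- ===== LEMMAS AND PROOFS =====

-- count of integers h in [0, n) with a ≤ h ≤ b, closed form
lemma countP_range_interval (n : Nat) (a b : Int) :
    ((List.map (fun (k : Nat) => (k : Int)) (List.range n)).countP
        (fun h => decide (a ≤ h ∧ h ≤ b)) : Int)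
      = max 0 (min ((n : Int) - 1) b - max 0 a + 1) := by
  induction n with
  | zero =>
    simp only [List.range_zero, List.map_nil, List.countP_nil, Nat.cast_zero]
    omega
  | succ m ih =>
    rw [List.range_succ, List.map_append, List.countP_append]
    have hsingle : ((List.map (fun (k : Nat) => (k : Int)) [m]).countP
        (fun h => decide (a ≤ h ∧ h ≤ b)))
        = if a ≤ (m : Int) ∧ (m : Int) ≤ b then 1 else 0 := by
      by_cases h : a ≤ (m : Int) ∧ (m : Int) ≤ b <;> simp [h]
    rw [hsingle]
    by_cases h : a ≤ (m : Int) ∧ (m : Int) ≤ b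
    · rw [if_pos h]; push_cast; push_cast at ih; omega
    · rw [if_neg h]; push_cast; push_cast at ih; omega

-- the inner scan of A equals the closed-form count of B, for every t and d
lemma race_eq (t d : Int) :
    (PySem.List.pyRange 0 t 1).foldl (fun validholds holdtime =>
        if holdtime * (t - holdtime) > d then validholds + 1 else validholds) (0 : Int)
      = winCount (t, d) := by
  rw [PySem.List.foldl_ite_add_one (p := fun h => h * (t - h) > d)]
  rw [PySem.List.pyRange_one]
  simp only [sub_zero, zero_add]
  unfold winCount
  simp only [gt_iff_lt]
  by_cases hdisc : t * t - 4 * d ≤ 0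
  · rw [if_pos hdisc]
    have hz : (List.map (fun (k : Nat) => (k : Int)) (List.range t.toNat)).countP
        (fun x => decide (d < x * (t - x))) = 0 := by
      rw [List.countP_eq_zero]
      intro h _
      simp only [decide_eq_true_eq]
      intro hlt
      nlinarith [sq_nonneg (2 * h - t)]
    rw [hz]
    simp
  · rw [if_neg hdisc]
    rw [not_le] at hdisc
    set s : Int := (Nat.sqrt (t * t - 4 * d - 1).toNat : Int) with hs
    have hs0 : 0 ≤ s := by positivity
    have hmnn : ((t * t - 4 * d - 1).toNat : Int) = t * t - 4 * d - 1 := by omega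
    have hsle : s ^ 2 ≤ t * t - 4 * d - 1 := by
      rw [hs, ← hmnn]
      exact_mod_cast Nat.sqrt_le' (t * t - 4 * d - 1).toNat
    have hslt : t * t - 4 * d - 1 < (s + 1) ^ 2 := by
      rw [hs, ← hmnn]
      exact_mod_cast Nat.lt_succ_sqrt' (t * t - 4 * d - 1).toNat
    have hpred : ∀ h : Int, d < h * (t - h) ↔
        (PySem.Int.floordiv (t - s + 1) 2 ≤ h ∧ h ≤ PySem.Int.floordiv (t + s) 2) := by
      intro h
      rw [PySem.Int.floordiv_eq_ediv_of_pos (by omega), PySem.Int.floordiv_eq_ediv_of_pos (by omega)]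
      have hsq : d < h * (t - h) ↔ (2 * h - t) * (2 * h - t) < t * t - 4 * d := by
        constructor <;> intro hx <;> nlinarith
      have habs : (2 * h - t) * (2 * h - t) < t * t - 4 * d ↔
          -s ≤ 2 * h - t ∧ 2 * h - t ≤ s := by
        constructor
        · intro hx
          constructor <;> by_contra hc <;> rw [not_le] at hc <;> nlinarith
        · rintro ⟨h1, h2⟩
          nlinarith
      rw [hsq, habs]
      omega
    have hfun : (fun x => decide (d < x * (t - x)))
        = (fun h => decide (PySem.Int.floordiv (t - s + 1) 2 ≤ h ∧ h ≤ PySem.Int.floordiv (t + s) 2)) :=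
      funext fun h => decide_eq_decide.mpr (hpred h)
    rw [hfun, countP_range_interval]
    omega

-- A's winners list equals B's winners list under Pre_
lemma winners_eq (times distances : List Int) (hpre : times.length ≤ distances.length) :
    (PySem.List.pyRange 0 (times.length : Int) 1).foldl (fun winners i =>
      match PySem.List.pyGet? times i, PySem.List.pyGet? distances i with
      | some time, some distance =>
          let validholds := (PySem.List.pyRange 0 time 1).foldl (fun validholds holdtime =>
            let speed := holdtime
            let traveltime := time - holdtime
            let totaldistance := speed * traveltime
            if totaldistance > distance then validholds + 1 else validholds) (0 : Int)
          winners ++ [validholds]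
      | _, _ => winners) ([] : List Int)
    = (times.zip distances).map winCount := by
  have hbody : (PySem.List.pyRange 0 (times.length : Int) 1).foldl (fun winners i =>
      match PySem.List.pyGet? times i, PySem.List.pyGet? distances i with
      | some time, some distance =>
          let validholds := (PySem.List.pyRange 0 time 1).foldl (fun validholds holdtime =>
            let speed := holdtime
            let traveltime := time - holdtime
            let totaldistance := speed * traveltime
            if totaldistance > distance then validholds + 1 else validholds) (0 : Int)
          winners ++ [validholds]
      | _, _ => winners) ([] : List Int)
    = (PySem.List.pyRange 0 (times.length : Int) 1).foldl (fun winners i =>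
        winners ++ [winCount (PySem.List.pyGetD times i 0, PySem.List.pyGetD distances i 0)]) [] := by
    apply PySem.List.foldl_congr_mem
    intro acc i hi
    rw [PySem.List.mem_pyRange_one] at hi
    obtain ⟨hi0, hilt⟩ := hi
    have hkd : i < (distances.length : Int) := by omega
    simp only [PySem.List.pyGet?_eq_some_getElem times hi0 hilt,
      PySem.List.pyGet?_eq_some_getElem distances hi0 hkd]
    rw [race_eq]
    rw [PySem.List.pyGetD_eq_getElem times 0 hi0 hilt,
        PySem.List.pyGetD_eq_getElem distances 0 hi0 hkd]
  rw [hbody, PySem.List.foldl_append_singleton_eq_map, List.nil_append]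
  apply List.ext_getElem
  · simp only [List.length_map, PySem.List.length_pyRange_one, List.length_zip, sub_zero,
      Int.toNat_natCast]
    omega
  · intro k h1 h2
    have hk : k < times.length := by
      simpa only [List.length_map, PySem.List.length_pyRange_one, sub_zero,
        Int.toNat_natCast] using h1
    rw [List.getElem_map, List.getElem_map, PySem.List.getElem_pyRange_one, List.getElem_zip]
    simp only [zero_add, PySem.List.pyGetD_natCast]
    rw [List.getD_eq_getElem _ _ hk, List.getD_eq_getElem _ _ (by omega)]

-- ===== VERDICT (by name: the statement is the Claim_ definition above) =====
theorem calculate_spec : Claim_equal_calculate := by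
  intro times distances _ hpre
  unfold Spec_calculate
  simp only [calculate, calculate_alt]
  rw [winners_eq times distances hpre]
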